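-- pv_equiv track=rewrite | github.com/anthony-cunningham/CS_1210_Intro_to_CS | CS_1210_Intro_to_CS/HW4Q2&3.py | q2List
-- ===== SOURCE A (Python) =====
-- def q2List(n):
--     recursiveList = []
--     if n == 0:
--         recursiveList.append(1)
--     else:
--         recursiveList.append(1)
--         recursiveList.append((n + 1)**2)
--         recursiveList.extend(q2List(n - 1))
--     return recursiveList
-- ===== SOURCE B (Python) =====
-- def q2List(n):
--     out = []
--     for k in range(n, 0, -1):
--         out.append(1)
--         out.append((k + 1) ** 2)
--     out.append(1)
--     return out
-- ===== Notes on version B (the rewrite author's own statement) =====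
-- stated objective: faster
-- what changed: Replaced the O(n^2) recursion (each level copies the whole suffix with extend) by a single iterative countdown loop that appends the two terms per level directly, then the final 1.
import Mathlib
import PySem

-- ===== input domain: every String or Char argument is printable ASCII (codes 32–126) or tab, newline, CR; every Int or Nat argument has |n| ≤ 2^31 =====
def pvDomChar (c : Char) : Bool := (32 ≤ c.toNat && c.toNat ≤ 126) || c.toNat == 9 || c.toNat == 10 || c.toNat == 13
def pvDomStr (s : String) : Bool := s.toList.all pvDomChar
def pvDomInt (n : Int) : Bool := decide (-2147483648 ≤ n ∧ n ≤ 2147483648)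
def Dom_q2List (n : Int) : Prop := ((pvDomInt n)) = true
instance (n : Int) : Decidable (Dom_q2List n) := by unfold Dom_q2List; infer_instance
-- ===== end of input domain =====

-- B replaces A's O(n^2) recursion (extend copies the whole suffix at each level) by one
-- iterative O(n) countdown loop appending the terms directly.

-- ===== PORT A =====
-- A recurses on n with no guard for n < 0 (Python hits the recursion limit there);
-- the fuel n.toNat + 1 suffices for every n admitted by Pre_ (0 ≤ n).
def q2ListAux : Nat → Int → List Int
  | 0, _ => []
  | fuel + 1, n =>
    if n == 0 then [1]
    else 1 :: (n + 1) ^ 2 :: q2ListAux fuel (n - 1)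

def q2List (n : Int) : List Int := q2ListAux (n.toNat + 1) n

-- ===== PORT B =====
def q2List_alt (n : Int) : List Int :=
  ((PySem.List.pyRange n 0 (-1)).foldl (fun out k => out ++ [1, (k + 1) ^ 2]) []) ++ [1]

-- ===== PRECONDITION & SPEC =====
-- Pre_ excludes n < 0, where A's recursion never reaches the base case (RecursionError).
def Pre_q2List (n : Int) : Prop := 0 ≤ n
instance (n : Int) : Decidable (Pre_q2List n) := by unfold Pre_q2List; infer_instance
def pvWitness_q2List : Int := (3)

def Spec_q2List (n : Int) (out : List Int) : Prop := out = q2List_alt n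
instance (n : Int) (out : List Int) : Decidable (Spec_q2List n out) := by unfold Spec_q2List; infer_instance

-- ===== CLAIM (what is proved, stated in full; the proofs are below) =====
def Claim_equal_q2List : Prop := ∀ (n : Int), Dom_q2List n → Pre_q2List n → Spec_q2List n (q2List n)

-- ===== LEMMAS AND PROOFS =====

theorem q2List_alt_zero : q2List_alt 0 = [1] := by decide

theorem q2List_alt_step (n : Int) (h : 0 < n) :
    q2List_alt n = 1 :: (n + 1) ^ 2 :: q2List_alt (n - 1) := by
  unfold q2List_alt
  rw [PySem.List.pyRange_neg_one_cons h]
  simp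

theorem q2ListAux_eq (m : Nat) : ∀ (fuel : Nat), m < fuel →
    q2ListAux fuel (m : Int) = q2List_alt (m : Int) := by
  induction m with
  | zero =>
    intro fuel hf
    cases fuel with
    | zero => omega
    | succ f => simp [q2ListAux, q2List_alt_zero]
  | succ m ih =>
    intro fuel hf
    cases fuel with
    | zero => omega
    | succ f =>
    have hm : m < f := Nat.lt_of_succ_lt_succ hf
    have hne : ¬ ((m : Int) + 1 = 0) := by omega
    have hsub : ((m + 1 : Nat) : Int) - 1 = (m : Int) := by push_cast; omega
    rw [q2List_alt_step _ (by push_cast; omega), show q2ListAux (f + 1) ((m + 1 : Nat) : Int)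
        = 1 :: (((m + 1 : Nat) : Int) + 1) ^ 2 :: q2ListAux f (((m + 1 : Nat) : Int) - 1) by
      simp [q2ListAux, hne], hsub, ih f hm]

-- ===== VERDICT (by name: the statement is the Claim_ definition above) =====
theorem q2List_spec : Claim_equal_q2List := by
  intro n _ hpre
  unfold Spec_q2List q2List
  have hn : ((n.toNat : Nat) : Int) = n := Int.toNat_of_nonneg hpre
  rw [← hn]
  exact q2ListAux_eq n.toNat (n.toNat + 1) (Nat.lt_succ_self _)
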